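-- pv_equiv track=rewrite | github.com/NogaUwU/chat-branch-visualizer | generate-logos.py | scale_grid
-- ===== SOURCE A (Python) =====
-- def scale_grid(grid, s):
--     """Nearest-neighbour scale by integer factor s."""
--     rows = []
--     for row in grid:
--         scaled_row = []
--         for cell in row:
--             scaled_row.extend([cell]*s)
--         for _ in range(s):
--             rows.append(scaled_row[:])
--     return rows
-- ===== SOURCE B (Python) =====
-- def scale_grid(grid, s):
--     """Nearest-neighbour scale by integer factor s (index-arithmetic pull)."""
--     return [[grid[i // s][j // s] for j in range(len(grid[i // s]) * s)]
--             for i in range(len(grid) * s)]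
-- ===== Notes on version B (the rewrite author's own statement) =====
-- stated objective: alternative
-- what changed: B builds the output by index arithmetic (pulling grid[i//s][j//s] over output coordinate ranges) instead of A's push-style replication with extend/append loops and row copies; s<=0 falls out of empty ranges.
import Mathlib
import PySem

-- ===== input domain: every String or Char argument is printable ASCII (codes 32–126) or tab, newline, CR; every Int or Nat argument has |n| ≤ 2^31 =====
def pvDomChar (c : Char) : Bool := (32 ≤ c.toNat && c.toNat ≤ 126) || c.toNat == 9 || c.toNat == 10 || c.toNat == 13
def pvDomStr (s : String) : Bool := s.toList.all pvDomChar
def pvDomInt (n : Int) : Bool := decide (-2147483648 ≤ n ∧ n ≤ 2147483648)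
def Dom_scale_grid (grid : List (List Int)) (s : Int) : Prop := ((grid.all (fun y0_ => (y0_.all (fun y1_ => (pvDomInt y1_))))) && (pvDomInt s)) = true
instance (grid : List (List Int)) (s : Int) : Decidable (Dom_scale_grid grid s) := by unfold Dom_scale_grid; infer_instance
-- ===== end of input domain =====

-- B pulls each output cell by index arithmetic instead of A's push-style replication; alternative decomposition, same cost.

-- ===== PORT A =====
-- 'scaled_row.extend([cell]*s)': Python list*int yields [] for s ≤ 0, which List.replicate s.toNat matches exactly.
def scale_grid (grid : List (List Int)) (s : Int) : List (List Int) :=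
  grid.foldl (fun rows row =>
    let scaled_row := row.foldl (fun acc cell => acc ++ List.replicate s.toNat cell) []
    (PySem.List.pyRange 0 s 1).foldl (fun rs _ => rs ++ [scaled_row]) rows) []

-- ===== PORT B =====
-- 'grid[i//s]' / 'r[j//s]': the comprehension only produces indices in range, so pyGetD is exact here.
def scale_grid_alt (grid : List (List Int)) (s : Int) : List (List Int) :=
  (PySem.List.pyRange 0 ((grid.length : Int) * s) 1).map (fun i =>
    (PySem.List.pyRange 0 (((PySem.List.pyGetD grid (PySem.Int.floordiv i s) []).length : Int) * s) 1).map (fun j =>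
      PySem.List.pyGetD (PySem.List.pyGetD grid (PySem.Int.floordiv i s) []) (PySem.Int.floordiv j s) 0))

-- ===== PRECONDITION & SPEC =====
def Spec_scale_grid (grid : List (List Int)) (s : Int) (out : List (List Int)) : Prop := out = scale_grid_alt grid s
instance (grid : List (List Int)) (s : Int) (out : List (List Int)) : Decidable (Spec_scale_grid grid s out) := by unfold Spec_scale_grid; infer_instance

-- ===== CLAIM (what is proved, stated in full; the proofs are below) =====
def Claim_equal_scale_grid : Prop := ∀ (grid : List (List Int)) (s : Int), Dom_scale_grid grid s → Spec_scale_grid grid s (scale_grid grid s)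

-- ===== LEMMAS AND PROOFS =====

/-- Canonical nearest-neighbour upscale: each row blown up cell-wise, then repeated. -/
def nnSpec (grid : List (List Int)) (n : Nat) : List (List Int) :=
  grid.flatMap (fun row => List.replicate n (row.flatMap (fun c => List.replicate n c)))

theorem foldl_rep (n : Nat) : ∀ (row : List Int) (acc : List Int),
    row.foldl (fun a c => a ++ List.replicate n c) acc
      = acc ++ row.flatMap (fun c => List.replicate n c) := by
  intro row
  induction row with
  | nil => simp
  | cons x xs ih => intro acc; simp [List.foldl, ih]

theorem foldl_app (x : List Int) : ∀ (l : List Int) (rows : List (List Int)),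
    l.foldl (fun rs _ => rs ++ [x]) rows = rows ++ List.replicate l.length x := by
  intro l
  induction l with
  | nil => simp
  | cons a as ih =>
      intro rows
      rw [List.foldl_cons, ih, List.append_assoc]
      simp [List.replicate_succ]

theorem foldl_outer (n : Nat) : ∀ (grid : List (List Int)) (rows : List (List Int)),
    grid.foldl (fun rs row => rs ++ List.replicate n (row.flatMap (fun c => List.replicate n c))) rows
      = rows ++ nnSpec grid n := by
  intro grid
  induction grid with
  | nil => simp [nnSpec]
  | cons r rs ih => intro rows; simp [List.foldl, ih, nnSpec, List.append_assoc]

theorem scale_grid_eq_nnSpec (grid : List (List Int)) (s : Int) :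
    scale_grid grid s = nnSpec grid s.toNat := by
  have h : scale_grid grid s
      = grid.foldl (fun rs row => rs ++ List.replicate s.toNat (row.flatMap (fun c => List.replicate s.toNat c))) [] := by
    unfold scale_grid
    congr 1
    funext rs row
    rw [foldl_rep, List.nil_append, foldl_app, PySem.List.length_pyRange_one]
    simp
  rw [h, foldl_outer]
  simp

/-- Pulling by `k / n` over `range (len * n)` is cell-wise replication. -/
theorem pull_div {β : Type} (n : Nat) (hn : 0 < n) :
    ∀ {α : Type} (l : List α) (d : α) (F : α → β),
    (List.range (l.length * n)).map (fun k => F (l.getD (k / n) d))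
      = l.flatMap (fun x => List.replicate n (F x)) := by
  intro α l
  induction l with
  | nil => simp
  | cons x xs ih =>
      intro d F
      have hlen : (x :: xs).length * n = n + xs.length * n := by
        simp [List.length_cons]; ring
      rw [hlen, List.range_add, List.map_append]
      congr 1
      · -- first block: indices k < n give x
        have : ∀ k ∈ List.range n, F ((x :: xs).getD (k / n) d) = F x := by
          intro k hk
          have hk' : k < n := List.mem_range.mp hk
          have : k / n = 0 := Nat.div_eq_of_lt hk'
          simp [this]
        rw [List.map_congr_left this]
        simp [List.map_const']
      · -- remaining blocks: (n + j) / n = 1 + j / n, shift to the tail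
        rw [List.map_map]
        have : ∀ j ∈ List.range (xs.length * n),
            ((fun k => F ((x :: xs).getD (k / n) d)) ∘ (fun j => n + j)) j
              = F (xs.getD (j / n) d) := by
          intro j _
          have hdv : (n + j) / n = j / n + 1 := by
            rw [Nat.add_comm]; exact Nat.add_div_right j hn
          simp [Function.comp, hdv]
        rw [List.map_congr_left this, ih]
        simp [List.flatMap_def]

/-- B's pull form over Nat indices. -/
def pullSpec (grid : List (List Int)) (n : Nat) : List (List Int) :=
  (List.range (grid.length * n)).map (fun k =>
    (List.range ((grid.getD (k / n) []).length * n)).map (fun j =>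
      (grid.getD (k / n) []).getD (j / n) (0 : Int)))

theorem pullSpec_eq (grid : List (List Int)) (n : Nat) (hn : 0 < n) :
    pullSpec grid n = nnSpec grid n := by
  have h1 : pullSpec grid n
      = grid.flatMap (fun row => List.replicate n
          ((List.range (row.length * n)).map (fun j => row.getD (j / n) (0 : Int)))) :=
    pull_div n hn grid []
      (fun r => (List.range (r.length * n)).map (fun j => r.getD (j / n) (0 : Int)))
  rw [h1]
  unfold nnSpec
  rw [List.flatMap_def, List.flatMap_def]
  apply congrArg List.flatten
  apply List.map_congr_left
  intro row _
  apply congrArg (List.replicate n)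
  exact pull_div n hn row 0 id

theorem scale_grid_alt_eq_nnSpec (grid : List (List Int)) (s : Int) :
    scale_grid_alt grid s = nnSpec grid s.toNat := by
  rcases (by omega : s ≤ 0 ∨ 0 < s) with hs | hs
  · -- s ≤ 0: both sides are empty
    have h0 : (0 : Int) ≤ (grid.length : Int) := Int.natCast_nonneg _
    have h1 : (grid.length : Int) * s ≤ 0 := by nlinarith
    have h2 : s.toNat = 0 := by omega
    unfold scale_grid_alt
    rw [PySem.List.pyRange_one_eq_nil (by omega)]
    simp [nnSpec, h2]
  · -- 0 < s: rewrite everything over Nat, then use pullSpec/pull_div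
    obtain ⟨n, rfl⟩ : ∃ n : Nat, s = (n : Int) := ⟨s.toNat, (Int.toNat_of_nonneg hs.le).symm⟩
    have hn : 0 < n := by exact_mod_cast hs
    have hrange : ∀ (m : Nat), PySem.List.pyRange 0 ((m : Int) * (n : Int)) 1
        = (List.range (m * n)).map (Nat.cast : Nat → Int) := by
      intro m
      have hc : ((m : Int) * (n : Int) - 0).toNat = m * n := by
        have h : ((m : Int) * (n : Int) - 0) = ((m * n : Nat) : Int) := by push_cast; ring
        rw [h, Int.toNat_natCast]
      rw [PySem.List.pyRange_one, hc]
      simp only [zero_add]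
    have hB : scale_grid_alt grid (n : Int) = pullSpec grid n := by
      unfold scale_grid_alt pullSpec
      rw [hrange grid.length, List.map_map]
      apply List.map_congr_left
      intro k _
      simp only [Function.comp, PySem.Int.floordiv_natCast, PySem.List.pyGetD_natCast]
      rw [hrange, List.map_map]
      apply List.map_congr_left
      intro j _
      simp only [Function.comp, PySem.Int.floordiv_natCast, PySem.List.pyGetD_natCast]
    rw [hB, pullSpec_eq grid n hn, Int.toNat_natCast]

-- ===== VERDICT (by name: the statement is the Claim_ definition above) =====
theorem scale_grid_spec : Claim_equal_scale_grid := by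
  intro grid s _
  unfold Spec_scale_grid
  rw [scale_grid_eq_nnSpec, scale_grid_alt_eq_nnSpec]
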